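-- pv_equiv track=rewrite | github.com/MrBrantCode/unitest_baseline | mut_generate/mist_train_cf/cf_96796/solution.py | unique_prime_numbers
-- ===== SOURCE A (Python) =====
-- import math
--
-- def unique_prime_numbers(numbers):
--     primes = set()
--     for num in numbers:
--         is_prime = True
--         if num <= 1:
--             is_prime = False
--         else:
--             for i in range(2, int(math.sqrt(num)) + 1):
--                 if num % i == 0:
--                     is_prime = False
--                     break
--         if is_prime:
--             primes.add(num)
--     return sorted(list(primes))
-- ===== SOURCE B (Python) =====
-- import math
--
-- def unique_prime_numbers(numbers):
--     cands = sorted({n for n in numbers if n >= 2})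
--     if not cands:
--         return []
--     r = math.isqrt(cands[-1])
--     flags = [True] * (r + 1)
--     small_primes = []
--     for p in range(2, r + 1):
--         if flags[p]:
--             small_primes.append(p)
--             for q in range(p * p, r + 1, p):
--                 flags[q] = False
--     out = []
--     for n in cands:
--         ok = True
--         for p in small_primes:
--             if p * p > n:
--                 break
--             if n % p == 0:
--                 ok = False
--                 break
--         if ok:
--             out.append(n)
--     return out
-- ===== Notes on version B (the rewrite author's own statement) =====
-- stated objective: faster
-- what changed: Instead of trial-dividing every number by all integers up to its square root, B sieves the primes up to sqrt(max candidate) once with a sieve of Eratosthenes and then tests each distinct candidate only against those precomputed primes.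
import Mathlib
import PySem

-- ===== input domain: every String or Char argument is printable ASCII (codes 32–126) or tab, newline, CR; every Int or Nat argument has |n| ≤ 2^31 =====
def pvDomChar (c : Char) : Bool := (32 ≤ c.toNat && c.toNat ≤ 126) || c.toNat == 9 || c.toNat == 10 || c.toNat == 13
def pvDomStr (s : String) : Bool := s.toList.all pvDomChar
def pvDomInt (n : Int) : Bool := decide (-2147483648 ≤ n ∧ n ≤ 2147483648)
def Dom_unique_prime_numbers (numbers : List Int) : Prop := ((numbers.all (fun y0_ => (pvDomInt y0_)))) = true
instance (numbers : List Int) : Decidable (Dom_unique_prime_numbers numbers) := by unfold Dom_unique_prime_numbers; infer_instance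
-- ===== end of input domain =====

-- B replaces per-number trial division by a one-off sieve of Eratosthenes up to sqrt(max candidate)
-- followed by trial division by those precomputed primes only (measured faster at scale).


-- ===== PORT A =====

-- the inner 'for i in range(...)' with its break: false as soon as a divisor is found
def pvTrialLoop (num : Int) : List Int → Bool
  | [] => true
  | i :: rest => if PySem.Int.mod num i == 0 then false else pvTrialLoop num rest

-- the loop body computing is_prime; int(math.sqrt(num)) = Nat.sqrt num.toNat, exact for 0 ≤ num ≤ 2^31 (Dom)
def pvIsPrimeA (num : Int) : Bool :=
  if num ≤ 1 then false
  else pvTrialLoop num (PySem.List.pyRange 2 ((Nat.sqrt num.toNat : Int) + 1) 1)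

def unique_prime_numbers (numbers : List Int) : List Int :=
  let primes : PySem.Set Int :=
    numbers.foldl (fun s num => if pvIsPrimeA num then PySem.Set.add s num else s) PySem.Set.empty
  PySem.List.sorted primes (fun x => x) false

-- ===== PORT B =====

-- 'flags[q] = False' (q is always nonnegative and in range here)
def pvMark (fl : List Bool) (q : Int) : List Bool := PySem.List.pySetD fl q false

-- one iteration of the outer sieve loop: state = (flags, small_primes)
def pvSieveStep (r : Int) (st : List Bool × List Int) (p : Int) : List Bool × List Int :=
  if PySem.List.pyGetD st.1 p true then
    ((PySem.List.pyRange (p * p) (r + 1) p).foldl pvMark st.1, st.2 ++ [p])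
  else st

-- the inner 'for p in small_primes' with its two breaks: ok = False exactly when a sieved prime ≤ sqrt(n) divides n
def pvTestLoop (n : Int) : List Int → Bool
  | [] => true
  | p :: rest =>
    if n < p * p then true
    else if PySem.Int.mod n p == 0 then false
    else pvTestLoop n rest

def unique_prime_numbers_alt (numbers : List Int) : List Int :=
  let cands := PySem.List.sorted (PySem.Set.ofList (numbers.filter (fun n => decide (2 ≤ n)))) (fun x => x) false
  if cands = [] then []
  else
    let r : Int := (Nat.sqrt (PySem.List.pyGetD cands (-1) 0).toNat : Int)  -- math.isqrt(cands[-1])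
    let st := (PySem.List.pyRange 2 (r + 1) 1).foldl (pvSieveStep r)
                (List.replicate (r + 1).toNat true, ([] : List Int))
    cands.filter (fun n => pvTestLoop n st.2)

-- ===== PRECONDITION & SPEC =====
def Spec_unique_prime_numbers (numbers : List Int) (out : List Int) : Prop := out = unique_prime_numbers_alt numbers
instance (numbers : List Int) (out : List Int) : Decidable (Spec_unique_prime_numbers numbers out) := by unfold Spec_unique_prime_numbers; infer_instance

-- ===== CLAIM (what is proved, stated in full; the proofs are below) =====
def Claim_equal_unique_prime_numbers : Prop := ∀ (numbers : List Int), Dom_unique_prime_numbers numbers → Spec_unique_prime_numbers numbers (unique_prime_numbers numbers)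

-- ===== LEMMAS AND PROOFS =====

-- A's inner loop with break is a search for a divisor
theorem pvTrialLoop_eq (num : Int) (l : List Int) :
    pvTrialLoop num l = !(l.any (fun i => PySem.Int.mod num i == 0)) := by
  induction l with
  | nil => rfl
  | cons i rest ih => by_cases h : PySem.Int.mod num i == 0 <;> simp [pvTrialLoop, h, ih]

-- A's primality test decides Nat.Prime
theorem pvIsPrimeA_iff (n : Int) : pvIsPrimeA n = true ↔ 2 ≤ n ∧ Nat.Prime n.toNat := by
  unfold pvIsPrimeA
  split_ifs with h
  · constructor
    · intro hf; cases hf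
    · rintro ⟨h2, -⟩; omega
  · push Not at h
    have h2 : (2 : Int) ≤ n := by omega
    have hcast : ((n.toNat : Int)) = n := Int.toNat_of_nonneg (by omega)
    rw [pvTrialLoop_eq]
    simp only [Bool.not_eq_eq_eq_not, Bool.not_true, List.any_eq_false, beq_iff_eq,
      PySem.Int.mod_eq_zero_iff_dvd, PySem.List.mem_pyRange_one]
    constructor
    · intro hall
      refine ⟨h2, ?_⟩
      rw [Nat.prime_def_le_sqrt]
      refine ⟨by omega, ?_⟩
      intro m hm2 hms hdvd
      refine hall (m : Int) ⟨by exact_mod_cast hm2, by omega⟩ ?_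
      rw [← hcast]; exact_mod_cast hdvd
    · rintro ⟨-, hp⟩ i ⟨hi2, hiu⟩ hdvd
      have hi0 : 0 ≤ i := by omega
      have : i.toNat ∣ n.toNat := by
        have : ((i.toNat : Int)) ∣ ((n.toNat : Int)) := by
          rw [Int.toNat_of_nonneg hi0, hcast]; exact hdvd
        exact_mod_cast this
      exact (Nat.prime_def_le_sqrt.mp hp).2 i.toNat (by omega) (by omega) this

-- marking loop: flags after the fold, position by position
theorem foldl_pvMark_length (l : List Int) (fl : List Bool) :
    (l.foldl pvMark fl).length = fl.length := by
  induction l generalizing fl with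
  | nil => rfl
  | cons j rest ih => simp [List.foldl, pvMark, ih, PySem.List.length_pySetD]

theorem foldl_pvMark_getD (l : List Int) (fl : List Bool)
    (h : ∀ j ∈ l, 0 ≤ j ∧ j.toNat < fl.length) (q : Nat) (hq : q < fl.length) :
    (l.foldl pvMark fl).getD q true = (if (q : Int) ∈ l then false else fl.getD q true) := by
  induction l generalizing fl with
  | nil => simp
  | cons j rest ih =>
    obtain ⟨hj0, hjlt⟩ := h j (by simp)
    have hset : pvMark fl j = fl.set j.toNat false := PySem.List.pySetD_of_nonneg fl false hj0
    have hlen : (pvMark fl j).length = fl.length := PySem.List.length_pySetD fl j false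
    rw [List.foldl_cons, ih (pvMark fl j) (fun x hx => by
        obtain ⟨h1, h2⟩ := h x (by simp [hx]); exact ⟨h1, by omega⟩) (by omega)]
    by_cases hmem : (q : Int) ∈ rest
    · simp [hmem]
    · by_cases hqj : (q : Int) = j
      · have hjq : j.toNat = q := by omega
        subst hjq
        simp [hqj, hset, List.getD_eq_getElem?_getD, hjlt]
      · have hne : j.toNat ≠ q := by omega
        simp [hmem, hqj, hset, List.getD_eq_getElem?_getD, List.getElem?_set_ne hne]

-- sieve invariant after the outer loop has processed [2, k)
def pvInv (r k : Int) (st : List Bool × List Int) : Prop :=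
  st.1.length = (r + 1).toNat ∧
  (∀ q : Nat, q ≤ r.toNat →
    (st.1.getD q true = false ↔ ∃ p : Nat, Nat.Prime p ∧ (p : Int) < k ∧ (p : Int) * p ≤ (q : Int) ∧ p ∣ q)) ∧
  (∀ x : Int, x ∈ st.2 ↔ 2 ≤ x ∧ x < k ∧ Nat.Prime x.toNat) ∧
  st.2.Pairwise (· < ·)

theorem pvSieve_inv (r : Int) (hr : 0 ≤ r) (k : Int) (h2 : 2 ≤ k) (hk : k ≤ r + 1) :
    pvInv r k ((PySem.List.pyRange 2 k 1).foldl (pvSieveStep r)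
      (List.replicate (r + 1).toNat true, ([] : List Int))) := by
  revert hk
  induction k, h2 using Int.le_induction with
  | base =>
    intro _
    rw [PySem.List.pyRange_one_eq_nil (le_refl 2), List.foldl_nil]
    refine ⟨by simp, ?_, by
      intro x; simp only [List.not_mem_nil, false_iff]; rintro ⟨h1, h, -⟩; omega, List.Pairwise.nil⟩
    intro q hq
    rw [List.getD_replicate _ (by omega : q < (r + 1).toNat)]
    simp only [Bool.true_eq_false, false_iff]
    rintro ⟨p, hp, hlt, -, -⟩
    have := hp.two_le
    omega
  | succ n hn ih =>
    intro hk1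
    obtain ⟨hL, hF, hP, hS⟩ := ih (by omega)
    set st := (PySem.List.pyRange 2 n 1).foldl (pvSieveStep r)
      (List.replicate (r + 1).toNat true, ([] : List Int)) with hst
    rw [PySem.List.pyRange_one_succ_right (by omega : (2:Int) ≤ n), List.foldl_append,
      List.foldl_cons, List.foldl_nil, ← hst]
    have hncast : ((n.toNat : Int)) = n := Int.toNat_of_nonneg (by omega)
    have hget : PySem.List.pyGetD st.1 n true = st.1.getD n.toNat true := by
      rw [PySem.List.pyGetD_eq_getElem st.1 true (by omega) (by rw [hL]; omega),
        List.getD_eq_getElem _ _ (by rw [hL]; omega)]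
    by_cases hflag : st.1.getD n.toNat true = true
    · -- n is unmarked, hence prime: append it and mark its multiples
      have hnot : ¬ ∃ p : Nat, Nat.Prime p ∧ (p : Int) < n ∧ (p : Int) * p ≤ ((n.toNat : Nat) : Int) ∧ p ∣ n.toNat := by
        intro hex
        rw [(hF n.toNat (by omega)).mpr hex] at hflag
        cases hflag
      have hprime : Nat.Prime n.toNat := by
        by_contra hnp
        have h1 : n.toNat ≠ 1 := by omega
        have hmf := Nat.minFac_prime h1
        have hdvd := Nat.minFac_dvd n.toNat
        have hsq : n.toNat.minFac ^ 2 ≤ n.toNat := Nat.minFac_sq_le_self (by omega) hnp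
        have h2m := hmf.two_le
        have hltn : n.toNat.minFac < n.toNat := by nlinarith
        exact hnot ⟨n.toNat.minFac, hmf, by omega, by nlinarith, hdvd⟩
      have hrange : ∀ j ∈ PySem.List.pyRange (n * n) (r + 1) n, 0 ≤ j ∧ j.toNat < st.1.length := by
        intro j hj
        rw [PySem.List.mem_pyRange_iff_of_pos (by omega)] at hj
        obtain ⟨hj1, hj2, -⟩ := hj
        have : (0:Int) ≤ n * n := by positivity
        refine ⟨by omega, by rw [hL]; omega⟩
      simp only [pvSieveStep, hget, hflag, if_pos]
      refine ⟨by rw [foldl_pvMark_length]; exact hL, ?_, ?_, ?_⟩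
      · intro q hq
        rw [foldl_pvMark_getD _ _ hrange q (by rw [hL]; omega)]
        by_cases hqm : (q : Int) ∈ PySem.List.pyRange (n * n) (r + 1) n
        · obtain ⟨hq1, hq2, hq3⟩ :=
            (PySem.List.mem_pyRange_iff_of_pos (show (0:Int) < n by omega) (q : Int)).mp hqm
          have hdq : (n : Int) ∣ (q : Int) := by
            have h' : (n : Int) ∣ ((q : Int) - n * n) + n * n :=
              dvd_add hq3 (dvd_mul_right n n)
            simpa using h'
          have hdqn : n.toNat ∣ q := by
            have : ((n.toNat : Int)) ∣ ((q : Int)) := by rw [hncast]; exact hdq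
            exact_mod_cast this
          rw [if_pos hqm]
          exact iff_of_true rfl ⟨n.toNat, hprime, by omega, by rw [hncast]; exact hq1, hdqn⟩
        · rw [if_neg hqm, hF q hq]
          constructor
          · rintro ⟨p, hp, hplt, hple, hpdvd⟩
            exact ⟨p, hp, by omega, hple, hpdvd⟩
          · rintro ⟨p, hp, hplt, hple, hpdvd⟩
            by_cases hpn : (p : Int) = n
            · exfalso
              apply hqm
              rw [PySem.List.mem_pyRange_iff_of_pos (by omega)]
              have hd : (n : Int) ∣ (q : Int) := by
                rw [← hpn]; exact_mod_cast hpdvd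
              refine ⟨by rw [← hpn]; exact hple, by omega, ?_⟩
              exact dvd_sub hd (dvd_mul_right n n)
            · exact ⟨p, hp, by omega, hple, hpdvd⟩
      · intro x
        simp only [List.mem_append, List.mem_singleton, hP x]
        constructor
        · rintro (⟨hx1, hx2, hx3⟩ | rfl)
          · exact ⟨hx1, by omega, hx3⟩
          · exact ⟨by omega, by omega, hprime⟩
        · rintro ⟨hx1, hx2, hx3⟩
          by_cases hxn : x = n
          · exact Or.inr hxn
          · exact Or.inl ⟨hx1, by omega, hx3⟩
      · rw [List.pairwise_append]
        exact ⟨hS, List.pairwise_singleton _ _, fun x hx y hy => by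
          rw [List.mem_singleton] at hy; subst hy; exact ((hP x).mp hx).2.1⟩
    · -- n is marked composite: state unchanged
      have hfalse : st.1.getD n.toNat true = false := by
        cases h' : st.1.getD n.toNat true
        · rfl
        · exact absurd h' hflag
      have hnp : ¬ Nat.Prime n.toNat := by
        intro hp
        obtain ⟨p, hpp, hplt, -, hpdvd⟩ := (hF n.toNat (by omega)).mp hfalse
        rcases hp.eq_one_or_self_of_dvd p hpdvd with h1 | h1
        · exact absurd h1 (by have := hpp.two_le; omega)
        · omega
      simp only [pvSieveStep, hget, hfalse, Bool.false_eq_true, if_false]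
      refine ⟨hL, ?_, ?_, hS⟩
      · intro q hq
        rw [hF q hq]
        constructor
        · rintro ⟨p, hp, hplt, hple, hpdvd⟩
          exact ⟨p, hp, by omega, hple, hpdvd⟩
        · rintro ⟨p, hp, hplt, hple, hpdvd⟩
          by_cases hpn : (p : Int) = n
          · exact absurd hp (show ¬ Nat.Prime p by
              rw [show p = n.toNat from by omega]; exact hnp)
          · exact ⟨p, hp, by omega, hple, hpdvd⟩
      · intro x
        rw [hP x]
        constructor
        · rintro ⟨hx1, hx2, hx3⟩; exact ⟨hx1, by omega, hx3⟩
        · rintro ⟨hx1, hx2, hx3⟩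
          refine ⟨hx1, ?_, hx3⟩
          by_cases hxn : x = n
          · exact absurd hx3 (show ¬ Nat.Prime x.toNat by
              rw [show x.toNat = n.toNat from by omega]; exact hnp)
          · omega

-- membership in B's small-primes list
theorem pvSmallPrimes_mem (r : Int) (hr : 1 ≤ r) (x : Int) :
    x ∈ ((PySem.List.pyRange 2 (r + 1) 1).foldl (pvSieveStep r)
          (List.replicate (r + 1).toNat true, ([] : List Int))).2 ↔
      2 ≤ x ∧ x ≤ r ∧ Nat.Prime x.toNat := by
  obtain ⟨-, -, hP, -⟩ := pvSieve_inv r (by omega) (r + 1) (by omega) (le_refl _)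
  rw [hP x]
  constructor
  · rintro ⟨a, b, c⟩; exact ⟨a, by omega, c⟩
  · rintro ⟨a, b, c⟩; exact ⟨a, by omega, c⟩

-- the sieved primes come out in increasing order
theorem pvSmallPrimes_sorted (r : Int) (hr : 1 ≤ r) :
    ((PySem.List.pyRange 2 (r + 1) 1).foldl (pvSieveStep r)
      (List.replicate (r + 1).toNat true, ([] : List Int))).2.Pairwise (· < ·) :=
  (pvSieve_inv r (by omega) (r + 1) (by omega) (le_refl _)).2.2.2

-- the break-loop tests exactly the divisors p ∈ l with p * p ≤ n (l increasing, elements ≥ 2)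
theorem pvTestLoop_eq_forall (n : Int) (l : List Int) (hs : l.Pairwise (· < ·))
    (h2 : ∀ x ∈ l, 2 ≤ x) : pvTestLoop n l = true ↔ ∀ p ∈ l, p * p ≤ n → ¬ p ∣ n := by
  induction l with
  | nil => simp [pvTestLoop]
  | cons a t ih =>
    have ha2 : (2:Int) ≤ a := h2 a (by simp)
    obtain ⟨halt, hst⟩ := List.pairwise_cons.mp hs
    unfold pvTestLoop
    split_ifs with hgt hdvd
    · refine iff_of_true rfl ?_
      intro p hp hple
      rcases List.mem_cons.mp hp with rfl | hp'
      · omega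
      · have hap : a < p := halt p hp'
        have : a * a ≤ p * p := by nlinarith
        omega
    · refine iff_of_false (by simp) ?_
      intro hall
      refine hall a (by simp) (by omega) ?_
      rw [← PySem.Int.mod_eq_zero_iff_dvd]
      exact eq_of_beq hdvd
    · rw [ih hst (fun x hx => h2 x (by simp [hx]))]
      constructor
      · intro hall p hp hple
        rcases List.mem_cons.mp hp with rfl | hp'
        · intro hd
          exact hdvd (by rw [beq_iff_eq, PySem.Int.mod_eq_zero_iff_dvd]; exact hd)
        · exact hall p hp' hple
      · exact fun hall p hp hple => hall p (by simp [hp]) hple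

-- B's per-candidate test decides Nat.Prime for candidates 2 ≤ n ≤ M, with r = isqrt(M)
theorem pvTestLoop_iff (M n : Int) (hn2 : 2 ≤ n) (hnM : n ≤ M)
    (ps : List Int)
    (hps : ∀ x : Int, x ∈ ps ↔ 2 ≤ x ∧ x ≤ (Nat.sqrt M.toNat : Int) ∧ Nat.Prime x.toNat)
    (hsort : ps.Pairwise (· < ·)) :
    pvTestLoop n ps = true ↔ Nat.Prime n.toNat := by
  have hncast : ((n.toNat : Int)) = n := Int.toNat_of_nonneg (by omega)
  rw [pvTestLoop_eq_forall n ps hsort (fun x hx => ((hps x).mp hx).1)]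
  constructor
  · intro hall
    by_contra hnp
    have h1 : n.toNat ≠ 1 := by omega
    have hmf := Nat.minFac_prime h1
    have hdvd := Nat.minFac_dvd n.toNat
    have hsq : n.toNat.minFac ^ 2 ≤ n.toNat := Nat.minFac_sq_le_self (by omega) hnp
    have h2f := hmf.two_le
    have hle : n.toNat.minFac ≤ Nat.sqrt M.toNat := by
      have hs1 : n.toNat.minFac ≤ Nat.sqrt n.toNat := Nat.le_sqrt.mpr (by nlinarith)
      exact le_trans hs1 (Nat.sqrt_le_sqrt (by omega))
    have hmem : ((n.toNat.minFac : Int)) ∈ ps :=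
      (hps _).mpr ⟨by exact_mod_cast h2f, by exact_mod_cast hle, by simpa using hmf⟩
    have hple : ((n.toNat.minFac : Int)) * n.toNat.minFac ≤ n := by
      have hnn : n.toNat.minFac * n.toNat.minFac ≤ n.toNat := by nlinarith
      calc ((n.toNat.minFac : Int)) * n.toNat.minFac
          = ((n.toNat.minFac * n.toNat.minFac : Nat) : Int) := by push_cast; ring
        _ ≤ ((n.toNat : Int)) := by exact_mod_cast hnn
        _ = n := hncast
    refine hall _ hmem hple ?_
    have hd : ((n.toNat.minFac : Int)) ∣ ((n.toNat : Int)) := Int.natCast_dvd_natCast.mpr hdvd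
    rwa [hncast] at hd
  · intro hp p hpin hple' hdvd
    obtain ⟨hp2, hpr, hpp⟩ := (hps p).mp hpin
    have hpd : p.toNat ∣ n.toNat := by
      have : ((p.toNat : Int)) ∣ ((n.toNat : Int)) := by
        rw [Int.toNat_of_nonneg (by omega : (0:Int) ≤ p), hncast]; exact hdvd
      exact_mod_cast this
    rcases hp.eq_one_or_self_of_dvd _ hpd with hc | hc
    · omega
    · have hpn : p = n := by omega
      rw [hpn] at hple'
      nlinarith

-- last element of a ≤-sorted list is an upper bound
theorem pvLast_max (l : List Int) (hl : l ≠ []) (hp : l.Pairwise (· ≤ ·)) :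
    ∀ x ∈ l, x ≤ l.getLast hl := by
  induction l with
  | nil => simp at hl
  | cons a t ih =>
    intro x hx
    cases t with
    | nil => simp at hx; simp [hx, List.getLast]
    | cons b u =>
      rcases List.mem_cons.mp hx with rfl | hx'
      · have hb : x ≤ b := (List.pairwise_cons.mp hp).1 b (by simp)
        have := ih (by simp) (List.pairwise_cons.mp hp).2 b (by simp)
        calc x ≤ b := hb
          _ ≤ _ := by simpa [List.getLast] using this
      · simpa [List.getLast] using ih (by simp) (List.pairwise_cons.mp hp).2 x hx'

-- ===== VERDICT (by name: the statement is the Claim_ definition above) =====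
theorem unique_prime_numbers_spec : Claim_equal_unique_prime_numbers := by
  intro numbers _
  unfold Spec_unique_prime_numbers unique_prime_numbers unique_prime_numbers_alt
  simp only []
  rw [PySem.List.foldl_if_eq_foldl_filter pvIsPrimeA PySem.Set.add numbers PySem.Set.empty,
    show (PySem.Set.empty : PySem.Set Int) = [] from rfl, ← PySem.Set.ofList_eq_foldl]
  set cands := PySem.List.sorted (PySem.Set.ofList (numbers.filter fun n => decide (2 ≤ n))) (fun x => x) false with hcands
  by_cases hc : cands = []
  · rw [if_pos hc]
    have hfe : numbers.filter (fun n => decide (2 ≤ n)) = [] := by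
      by_contra hne
      obtain ⟨x, hx⟩ := List.exists_mem_of_ne_nil _ hne
      have hmem : x ∈ cands := by
        rw [hcands, PySem.List.mem_sorted, PySem.Set.mem_ofList]; exact hx
      rw [hc] at hmem; cases hmem
    have hfp : numbers.filter pvIsPrimeA = [] := by
      rw [List.eq_nil_iff_forall_not_mem]
      intro x hx
      rw [List.mem_filter] at hx
      obtain ⟨h2x, -⟩ := (pvIsPrimeA_iff x).mp hx.2
      have : x ∈ numbers.filter (fun n => decide (2 ≤ n)) :=
        List.mem_filter.mpr ⟨hx.1, by simp [h2x]⟩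
      rw [hfe] at this; cases this
    rw [hfp]
    rfl
  · rw [if_neg hc]
    have hMlast : PySem.List.pyGetD cands (-1) 0 = cands.getLast hc :=
      PySem.List.pyGetD_neg_one cands 0 hc
    set M := PySem.List.pyGetD cands (-1) 0 with hMdef
    have hcm : ∀ x, x ∈ cands ↔ x ∈ numbers ∧ 2 ≤ x := by
      intro x
      rw [hcands, PySem.List.mem_sorted, PySem.Set.mem_ofList, List.mem_filter]
      simp
    have hub : ∀ x ∈ cands, x ≤ M := by
      rw [hMlast]
      exact pvLast_max cands hc (PySem.List.sorted_pairwise _ _)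
    have hM2 : 2 ≤ M := ((hcm M).mp (hMlast ▸ List.getLast_mem hc)).2
    have hr1 : (1:Int) ≤ ((Nat.sqrt M.toNat : Int)) := by
      exact_mod_cast Nat.le_sqrt.mpr (by omega : 1 * 1 ≤ M.toNat)
    have hps := pvSmallPrimes_mem ((Nat.sqrt M.toNat : Int)) hr1
    have hsort := pvSmallPrimes_sorted ((Nat.sqrt M.toNat : Int)) hr1
    apply PySem.List.sorted_eq_of_perm_of_pairwise_lt
    · rw [List.perm_ext_iff_of_nodup
        (List.Nodup.filter _ ((PySem.List.sorted_perm _ _ _).nodup_iff.mpr (PySem.Set.nodup_ofList _)))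
        (PySem.Set.nodup_ofList _)]
      intro x
      rw [List.mem_filter, PySem.Set.mem_ofList, List.mem_filter]
      constructor
      · rintro ⟨hxc, htest⟩
        obtain ⟨hxn, hx2⟩ := (hcm x).mp hxc
        have hprime := (pvTestLoop_iff M x hx2 (hub x hxc) _ hps hsort).mp htest
        exact ⟨hxn, (pvIsPrimeA_iff x).mpr ⟨hx2, hprime⟩⟩
      · rintro ⟨hxn, hpa⟩
        obtain ⟨hx2, hprime⟩ := (pvIsPrimeA_iff x).mp hpa
        have hxc : x ∈ cands := (hcm x).mpr ⟨hxn, hx2⟩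
        exact ⟨hxc, (pvTestLoop_iff M x hx2 (hub x hxc) _ hps hsort).mpr hprime⟩
    · exact (PySem.List.sorted_ofList_pairwise_lt _).filter _
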